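-- pv_equiv track=rewrite | github.com/ChangxingJiang/metasequoia-sql | metasequoia_sql/ast/nodes.py | text_to_char_array
-- ===== SOURCE A (Python) =====
-- from typing import Tuple, List, Optional, Union
--
-- def text_to_char_array(text: str) -> List[Tuple[str, int, int, int]]:
--     """将字符串转化为每个字符信息的列表
--
--     Parameters
--     ----------
--     text : str
--         字符串
--
--     Returns
--     -------
--     列表中每个元素为一个字符；每个元素的元组中的第 0 个元素为字符，第 1 个字符为完整字符串中的下标，第 2 个字符为行号，第 3 个字符为列号
--     """
--     result: List[Tuple[str, int, int, int]] = []
--     lineno: int = 1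
--     offset: int = 0
--     for i, ch in enumerate(text):
--         result.append((ch, i, lineno, offset))
--         if ch != "\n":
--             offset += 1
--         else:  # 换行符
--             lineno += 1
--             offset = 0
--     return result
-- ===== SOURCE B (Python) =====
-- from typing import Tuple, List
--
-- def text_to_char_array(text: str) -> List[Tuple[str, int, int, int]]:
--     result: List[Tuple[str, int, int, int]] = []
--     segments = text.split("\n")
--     last = len(segments) - 1
--     idx = 0
--     for j, seg in enumerate(segments):
--         for col, ch in enumerate(seg):
--             result.append((ch, idx, j + 1, col))
--             idx += 1
--         if j != last:
--             result.append(("\n", idx, j + 1, len(seg)))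
--             idx += 1
--     return result
-- ===== Notes on version B (the rewrite author's own statement) =====
-- stated objective: alternative
-- what changed: Replaces the single flat enumerate pass with running lineno/offset state by split("\n") into lines first, then an outer loop over lines (line = j+1) with an inner loop over the line's characters (column = position in line), re-emitting the separating newline between lines.
import Mathlib
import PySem

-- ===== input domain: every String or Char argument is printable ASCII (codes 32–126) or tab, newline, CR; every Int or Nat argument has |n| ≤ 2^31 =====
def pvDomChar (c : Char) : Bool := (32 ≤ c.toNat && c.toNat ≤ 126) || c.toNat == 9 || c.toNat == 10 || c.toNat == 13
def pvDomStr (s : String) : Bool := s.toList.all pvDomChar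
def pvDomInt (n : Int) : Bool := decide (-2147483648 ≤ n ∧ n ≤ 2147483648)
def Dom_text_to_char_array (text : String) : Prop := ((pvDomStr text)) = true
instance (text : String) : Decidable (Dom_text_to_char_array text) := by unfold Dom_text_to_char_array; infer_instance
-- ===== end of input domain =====

-- B replaces A's single flat enumerate pass carrying lineno/offset state with a split("\n")
-- into lines and a nested lines-then-columns traversal (objective: alternative decomposition).

-- ===== PORT A =====
-- loop body of A's single 'for i, ch in enumerate(text)' pass
def stepA (st : List (String × Int × Int × Int) × Int × Int) (p : Int × Char) :
    List (String × Int × Int × Int) × Int × Int :=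
  let res := st.1 ++ [(String.mk [p.2], p.1, st.2.1, st.2.2)]
  if p.2 ≠ '\n' then (res, st.2.1, st.2.2 + 1) else (res, st.2.1 + 1, 0)

def text_to_char_array (text : String) : List (String × Int × Int × Int) :=
  ((PySem.List.enumerate text.toList 0).foldl stepA ([], 1, 0)).1

-- ===== PORT B =====
-- inner loop body of B: 'for col, ch in enumerate(seg)' at a fixed line
def stepBinner (line : Int) (st : List (String × Int × Int × Int) × Int) (cp : Int × Char) :
    List (String × Int × Int × Int) × Int :=
  (st.1 ++ [(String.mk [cp.2], st.2, line, cp.1)], st.2 + 1)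

-- outer loop body of B: 'for j, seg in enumerate(segments)', re-emitting '\n' when j != last
def stepBouter (last : Int) (st : List (String × Int × Int × Int) × Int) (jp : Int × List Char) :
    List (String × Int × Int × Int) × Int :=
  let st2 := (PySem.List.enumerate jp.2 0).foldl (stepBinner (jp.1 + 1)) st
  if jp.1 ≠ last then
    (st2.1 ++ [("\n", st2.2, jp.1 + 1, (jp.2.length : Int))], st2.2 + 1)
  else st2

def text_to_char_array_alt (text : String) : List (String × Int × Int × Int) :=
  let segments := PySem.Chars.splitOn text.toList ['\n']
  ((PySem.List.enumerate segments 0).foldl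
      (stepBouter ((segments.length : Int) - 1)) ([], 0)).1

-- ===== PRECONDITION & SPEC =====
def Spec_text_to_char_array (text : String) (out : List (String × Int × Int × Int)) : Prop := out = text_to_char_array_alt text
instance (text : String) (out : List (String × Int × Int × Int)) : Decidable (Spec_text_to_char_array text out) := by unfold Spec_text_to_char_array; infer_instance

-- ===== CLAIM (what is proved, stated in full; the proofs are below) =====
def Claim_equal_text_to_char_array : Prop := ∀ (text : String), Dom_text_to_char_array text → Spec_text_to_char_array text (text_to_char_array text)

-- ===== LEMMAS AND PROOFS =====

-- split of a char list at '\n', in Python's str.split("\n") convention, as a structural recursion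
def linesOf : List Char → List (List Char)
  | [] => [[]]
  | c :: rest =>
    if c = '\n' then [] :: linesOf rest
    else
      match linesOf rest with
      | t :: ts => (c :: t) :: ts
      | [] => [[c]]

lemma linesOf_ne_nil (cs : List Char) : linesOf cs ≠ [] := by
  cases cs with
  | nil => simp [linesOf]
  | cons c rest =>
    simp only [linesOf]
    split_ifs
    · simp
    · cases h : linesOf rest <;> simp

-- prepend to the first piece
def consHead (pre : List Char) : List (List Char) → List (List Char)
  | [] => [pre]
  | t :: ts => (pre ++ t) :: ts

lemma splitOn_go_nl (fuel : Nat) :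
    ∀ (l cur : List Char) (acc : List (List Char)), l.length < fuel →
      PySem.Chars.splitOn.go ['\n'] fuel l cur acc = acc.reverse ++ consHead cur.reverse (linesOf l) := by
  induction fuel with
  | zero => intro l cur acc h; omega
  | succ f ih =>
    intro l cur acc h
    cases l with
    | nil => simp [PySem.Chars.splitOn.go, linesOf, consHead]
    | cons c rest =>
      by_cases hc : c = '\n'
      · subst hc
        have hpre : List.isPrefixOf ['\n'] ('\n' :: rest) = true := by simp [List.isPrefixOf]
        simp only [PySem.Chars.splitOn.go, hpre, if_pos, List.length_cons, List.drop_succ_cons]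
        simp only [List.length_nil, List.drop_zero]
        rw [ih rest [] (cur.reverse :: acc) (by simpa using Nat.lt_of_succ_lt_succ h)]
        have hne := linesOf_ne_nil rest
        cases hrec : linesOf rest with
        | nil => exact absurd hrec hne
        | cons t ts => simp [linesOf, consHead, hrec]
      · have hpre : List.isPrefixOf ['\n'] (c :: rest) = false := by
          simp [List.isPrefixOf]
          intro hcc; exact hc hcc.symm
        simp only [PySem.Chars.splitOn.go, hpre]
        rw [if_neg (by simp)]
        rw [ih rest (c :: cur) acc (by simpa using Nat.lt_of_succ_lt_succ h)]
        have hne := linesOf_ne_nil rest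
        cases hrec : linesOf rest with
        | nil => exact absurd hrec hne
        | cons t ts => simp [linesOf, hc, hrec, consHead]

lemma splitOn_nl (cs : List Char) : PySem.Chars.splitOn cs ['\n'] = linesOf cs := by
  unfold PySem.Chars.splitOn
  rw [splitOn_go_nl (cs.length + 1) cs [] [] (by omega)]
  have hne := linesOf_ne_nil cs
  cases hrec : linesOf cs with
  | nil => exact absurd hrec hne
  | cons t ts => simp [consHead]

-- join back with '\n'
def joinNL : List (List Char) → List Char
  | [] => []
  | [s] => s
  | s :: rest => s ++ '\n' :: joinNL rest

lemma joinNL_cons_cons (c : Char) (t : List Char) (ts : List (List Char)) :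
    joinNL ((c :: t) :: ts) = c :: joinNL (t :: ts) := by
  cases ts <;> simp [joinNL]

lemma joinNL_linesOf (cs : List Char) : joinNL (linesOf cs) = cs := by
  induction cs with
  | nil => simp [linesOf, joinNL]
  | cons c rest ih =>
    by_cases hc : c = '\n'
    · subst hc
      have hne := linesOf_ne_nil rest
      cases hrec : linesOf rest with
      | nil => exact absurd hrec hne
      | cons t ts =>
        rw [hrec] at ih
        simp [linesOf, joinNL, hrec, ih]
    · have hne := linesOf_ne_nil rest
      cases hrec : linesOf rest with
      | nil => exact absurd hrec hne
      | cons t ts =>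
        rw [hrec] at ih
        simp only [linesOf, hrec]
        rw [if_neg hc, joinNL_cons_cons, ih]

lemma mem_linesOf_no_nl (cs : List Char) : ∀ seg ∈ linesOf cs, '\n' ∉ seg := by
  induction cs with
  | nil => simp [linesOf]
  | cons c rest ih =>
    by_cases hc : c = '\n'
    · subst hc
      simp only [linesOf, if_pos]
      intro seg hseg
      rcases List.mem_cons.mp hseg with h | h
      · simp [h]
      · exact ih seg h
    · have hne := linesOf_ne_nil rest
      cases hrec : linesOf rest with
      | nil => exact absurd hrec hne
      | cons t ts =>
        rw [hrec] at ih
        simp only [linesOf, hrec]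
        rw [if_neg hc]
        intro seg hseg
        rcases List.mem_cons.mp hseg with h | h
        · subst h
          intro hmem
          rcases List.mem_cons.mp hmem with h' | h'
          · exact hc h'.symm
          · exact ih t (by simp) h'
        · exact ih seg (List.mem_cons.mpr (Or.inr h))

-- the tuples both programs emit for one newline-free segment
def segTuples : List Char → Int → Int → Int → List (String × Int × Int × Int)
  | [], _, _, _ => []
  | c :: rest, idx, line, col =>
    (String.mk [c], idx, line, col) :: segTuples rest (idx + 1) line (col + 1)

lemma foldA_seg (seg : List Char) (hseg : '\n' ∉ seg) :
    ∀ (s off : Int) (acc : List (String × Int × Int × Int)) (ln : Int),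
      (PySem.List.enumerate seg s).foldl stepA (acc, ln, off) =
        (acc ++ segTuples seg s ln off, ln, off + seg.length) := by
  induction seg with
  | nil => intro s off acc ln; simp [PySem.List.enumerate_nil, segTuples]
  | cons c rest ih =>
    intro s off acc ln
    have hc : c ≠ '\n' := fun h => hseg (by simp [h])
    have hrest : '\n' ∉ rest := fun h => hseg (by simp [h])
    rw [PySem.List.enumerate_cons, List.foldl_cons]
    show (PySem.List.enumerate rest (s + 1)).foldl stepA (stepA (acc, ln, off) (s, c)) = _
    have hstep : stepA (acc, ln, off) (s, c) =
        (acc ++ [(String.mk [c], s, ln, off)], ln, off + 1) := by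
      simp [stepA, hc]
    rw [hstep, ih hrest (s + 1) (off + 1)]
    simp [segTuples]
    omega

lemma foldB_inner (line : Int) (seg : List Char) :
    ∀ (s idx : Int) (acc : List (String × Int × Int × Int)),
      (PySem.List.enumerate seg s).foldl (stepBinner line) (acc, idx) =
        (acc ++ segTuples seg idx line s, idx + seg.length) := by
  induction seg with
  | nil => intro s idx acc; simp [PySem.List.enumerate_nil, segTuples]
  | cons c rest ih =>
    intro s idx acc
    rw [PySem.List.enumerate_cons, List.foldl_cons]
    show (PySem.List.enumerate rest (s + 1)).foldl (stepBinner line)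
        (stepBinner line (acc, idx) (s, c)) = _
    rw [show stepBinner line (acc, idx) (s, c) =
        (acc ++ [(String.mk [c], idx, line, s)], idx + 1) from rfl]
    rw [ih (s + 1) (idx + 1)]
    simp [segTuples]
    omega

-- the common output, structurally over the list of segments
def Bspec : Int → Int → List (List Char) → List (String × Int × Int × Int)
  | _, _, [] => []
  | line, idx, [seg] => segTuples seg idx line 0
  | line, idx, seg :: rest =>
    segTuples seg idx line 0 ++
      ("\n", idx + seg.length, line, (seg.length : Int)) ::
        Bspec (line + 1) (idx + seg.length + 1) rest

lemma string_mk_nl : String.mk ['\n'] = "\n" := rfl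

lemma foldA_eq_Bspec (segs : List (List Char)) (hnl : ∀ seg ∈ segs, '\n' ∉ seg) :
    ∀ (ln idx : Int) (acc : List (String × Int × Int × Int)),
      ∃ st : Int × Int,
        (PySem.List.enumerate (joinNL segs) idx).foldl stepA (acc, ln, 0) =
          (acc ++ Bspec ln idx segs, st) := by
  induction segs with
  | nil => intro ln idx acc; exact ⟨(ln, 0), by simp [joinNL, PySem.List.enumerate_nil, Bspec]⟩
  | cons seg rest ih =>
    intro ln idx acc
    have hseg : '\n' ∉ seg := hnl seg (by simp)
    cases rest with
    | nil =>
      refine ⟨(ln, seg.length), ?_⟩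
      show (PySem.List.enumerate seg idx).foldl stepA (acc, ln, 0) = _
      rw [foldA_seg seg hseg idx 0 acc ln]
      simp [Bspec]
    | cons r rs =>
      have hrest : ∀ s ∈ r :: rs, '\n' ∉ s := fun s hs => hnl s (by simp [hs])
      have hjoin : joinNL (seg :: r :: rs) = seg ++ '\n' :: joinNL (r :: rs) := by
        simp [joinNL]
      rw [hjoin, PySem.List.enumerate_append, List.foldl_append,
        foldA_seg seg hseg idx 0 acc ln, PySem.List.enumerate_cons, List.foldl_cons]
      have hstep : stepA (acc ++ segTuples seg idx ln 0, ln, 0 + (seg.length : Int))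
          ((idx + seg.length : Int), '\n') =
          (acc ++ segTuples seg idx ln 0 ++
            [("\n", idx + (seg.length : Int), ln, (seg.length : Int))], ln + 1, 0) := by
        simp [stepA, string_mk_nl]
      rw [hstep]
      obtain ⟨st, hst⟩ := ih hrest (ln + 1) (idx + seg.length + 1)
        (acc ++ segTuples seg idx ln 0 ++ [("\n", idx + (seg.length : Int), ln, (seg.length : Int))])
      refine ⟨st, ?_⟩
      rw [show (idx + (seg.length : Int)) + 1 = idx + seg.length + 1 by ring] at hst
      rw [hst]
      simp [Bspec]

lemma foldB_eq_Bspec (segs : List (List Char)) :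
    ∀ (j0 idx : Int) (acc : List (String × Int × Int × Int)),
      ∃ idx' : Int,
        (PySem.List.enumerate segs j0).foldl (stepBouter (j0 + segs.length - 1)) (acc, idx) =
          (acc ++ Bspec (j0 + 1) idx segs, idx') := by
  induction segs with
  | nil => intro j0 idx acc; exact ⟨idx, by simp [PySem.List.enumerate_nil, Bspec]⟩
  | cons seg rest ih =>
    intro j0 idx acc
    rw [PySem.List.enumerate_cons, List.foldl_cons]
    have houter : stepBouter (j0 + (seg :: rest).length - 1) (acc, idx) (j0, seg) =
        if j0 ≠ j0 + (seg :: rest).length - 1 then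
          (acc ++ segTuples seg idx (j0 + 1) 0 ++
            [("\n", idx + seg.length, j0 + 1, (seg.length : Int))], idx + seg.length + 1)
        else (acc ++ segTuples seg idx (j0 + 1) 0, idx + (seg.length : Int)) := by
      simp only [stepBouter, foldB_inner (j0 + 1) seg 0 idx acc]
    cases rest with
    | nil =>
      refine ⟨idx + seg.length, ?_⟩
      rw [houter, if_neg (by simp)]
      simp [PySem.List.enumerate_nil, Bspec]
    | cons r rs =>
      rw [houter, if_pos (by simp; omega)]
      have hL : j0 + ((seg :: r :: rs).length : Int) - 1 =
          (j0 + 1) + ((r :: rs).length : Int) - 1 := by simp; ring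
      rw [hL]
      obtain ⟨idx', hst⟩ := ih (j0 + 1) (idx + seg.length + 1)
        (acc ++ segTuples seg idx (j0 + 1) 0 ++
          [("\n", idx + seg.length, j0 + 1, (seg.length : Int))])
      refine ⟨idx', ?_⟩
      rw [hst]
      simp [Bspec]

-- ===== VERDICT (by name: the statement is the Claim_ definition above) =====
theorem text_to_char_array_spec : Claim_equal_text_to_char_array := by
  intro text _
  unfold Spec_text_to_char_array text_to_char_array text_to_char_array_alt
  rw [splitOn_nl]
  obtain ⟨idx', hB⟩ := foldB_eq_Bspec (linesOf text.toList) 0 0 []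
  rw [show (0 : Int) + ((linesOf text.toList).length : Int) - 1 =
    ((linesOf text.toList).length : Int) - 1 by ring] at hB
  obtain ⟨st, hA⟩ := foldA_eq_Bspec (linesOf text.toList) (mem_linesOf_no_nl text.toList) 1 0 []
  rw [joinNL_linesOf] at hA
  simp only [hA, hB]
  norm_num
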